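-- pv_equiv track=rewrite | github.com/renanleonel/leetcode | 1700.py | numberOfStudents
-- ===== SOURCE A (Python) =====
-- def numberOfStudents(students, sandwiches):
--     res = len(students)
--     hashmap = {}
--
--     for num in students:
--         hashmap[num] = 1 + hashmap.get(num, 0)
--
--     for num in sandwiches:
--         if num in hashmap and hashmap[num] > 0:
--             res -= 1
--             hashmap[num] -= 1
--         else:
--             return res
--
--     return res
-- ===== SOURCE B (Python) =====
-- from collections import deque
--
--
-- def numberOfStudents(students, sandwiches):
--     queue = deque(students)
--     i = 0
--     rotations = 0
--     while queue and i < len(sandwiches) and rotations < len(queue):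
--         if queue[0] == sandwiches[i]:
--             queue.popleft()
--             i += 1
--             rotations = 0
--         else:
--             queue.append(queue.popleft())
--             rotations += 1
--     return len(queue)
-- ===== Notes on version B (the rewrite author's own statement) =====
-- stated objective: alternative
-- what changed: B replaces A's frequency-hashmap scan with the literal queue simulation: students form a deque, each unwilling front student is rotated to the back, and a consecutive-rotation counter detects when nobody wants the current sandwich.
import Mathlib
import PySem

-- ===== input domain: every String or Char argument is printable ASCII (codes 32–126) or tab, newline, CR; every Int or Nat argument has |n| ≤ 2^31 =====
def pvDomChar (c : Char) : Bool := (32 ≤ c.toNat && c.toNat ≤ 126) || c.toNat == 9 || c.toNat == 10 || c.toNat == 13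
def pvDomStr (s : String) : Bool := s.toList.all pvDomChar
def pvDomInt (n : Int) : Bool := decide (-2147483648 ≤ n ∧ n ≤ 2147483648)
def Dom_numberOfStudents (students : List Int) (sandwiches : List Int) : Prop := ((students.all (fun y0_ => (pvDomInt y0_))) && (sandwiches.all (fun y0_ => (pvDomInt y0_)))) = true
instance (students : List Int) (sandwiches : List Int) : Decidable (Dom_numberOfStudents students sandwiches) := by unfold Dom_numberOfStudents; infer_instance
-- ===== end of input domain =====

-- B replaces A's frequency-hashmap scan with the literal queue simulation (deque of
-- students, non-takers rotated to the back, a consecutive-rotation counter detects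
-- that nobody wants the current sandwich); the return value is proved identical.

-- ===== PORT A =====
-- the 'for num in sandwiches' loop with its early return
def pvServeA (res : Int) (h : PySem.Dict Int Int) (sandwiches : List Int) : Int :=
  match sandwiches with
  | [] => res
  | num :: rest =>
    if h.contains num && decide (h.getD num 0 > 0) then
      pvServeA (res - 1) (h.insert num (h.getD num 0 - 1)) rest
    else res

def numberOfStudents (students : List Int) (sandwiches : List Int) : Int :=
  let res : Int := students.length
  let hashmap : PySem.Dict Int Int :=
    students.foldl (fun d num => d.insert num (1 + d.getD num 0)) PySem.Dict.empty
  pvServeA res hashmap sandwiches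

-- ===== PORT B =====
-- the 'while queue and i < len(sandwiches) and rotations < len(queue)' loop:
-- q is the deque, sw the still-unserved sandwiches (the pointer i), rot the counter
def pvDeqLoop (q : List Int) (sw : List Int) (rot : Nat) : Int :=
  match q, sw with
  | [], _ => 0
  | a :: t, s :: rest =>
    if rot < (a :: t).length then
      if a = s then pvDeqLoop t rest 0
      else pvDeqLoop (t ++ [a]) (s :: rest) (rot + 1)
    else ((a :: t).length : Int)
  | _ :: _, [] => (q.length : Int)
  termination_by (sw.length, q.length - rot)
  decreasing_by
  · simp; omega
  · simp_all; omega

def numberOfStudents_alt (students : List Int) (sandwiches : List Int) : Int :=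
  pvDeqLoop students sandwiches 0

-- ===== PRECONDITION & SPEC =====
def Spec_numberOfStudents (students : List Int) (sandwiches : List Int) (out : Int) : Prop := out = numberOfStudents_alt students sandwiches
instance (students : List Int) (sandwiches : List Int) (out : Int) : Decidable (Spec_numberOfStudents students sandwiches out) := by unfold Spec_numberOfStudents; infer_instance

-- ===== CLAIM (what is proved, stated in full; the proofs are below) =====
def Claim_equal_numberOfStudents : Prop := ∀ (students : List Int) (sandwiches : List Int), Dom_numberOfStudents students sandwiches → Spec_numberOfStudents students sandwiches (numberOfStudents students sandwiches)

-- ===== LEMMAS AND PROOFS =====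

-- multiset-style reference serving (proof helper only): erase the first wanting student
def msServe (q : List Int) (sw : List Int) : Int :=
  match sw with
  | [] => (q.length : Int)
  | s :: rest => if s ∈ q then msServe (q.erase s) rest else (q.length : Int)

-- msServe depends only on the multiset of remaining students
theorem msServe_perm (sw : List Int) : ∀ q q' : List Int, q.Perm q' →
    msServe q sw = msServe q' sw := by
  induction sw with
  | nil => intro q q' h; simp [msServe, h.length_eq]
  | cons s rest ih =>
    intro q q' h
    simp only [msServe, h.mem_iff, h.length_eq]
    split_ifs with hm
    · exact ih _ _ (h.erase s)
    · rfl

-- the dict built by A's first loop holds the multiplicity of each value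
theorem getD_build (xs : List Int) (d : PySem.Dict Int Int) (x : Int) :
    (xs.foldl (fun d num => d.insert num (1 + d.getD num 0)) d).getD x 0
      = d.getD x 0 + xs.count x := by
  induction xs generalizing d with
  | nil => simp
  | cons y ys ih =>
    simp only [List.foldl_cons, ih, PySem.Dict.getD_insert, List.count_cons]
    by_cases hxy : x = y
    · subst hxy; simp; omega
    · have : (x == y) = false := by simp [hxy]
      simp [hxy, Ne.symm hxy]

-- A's serving loop equals msServe, under the invariant that the dict counts the remaining list
theorem serveA_eq_ms (sandwiches : List Int) (remaining : List Int) (h : PySem.Dict Int Int)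
    (hinv : ∀ x, h.getD x 0 = remaining.count x) :
    pvServeA (remaining.length) h sandwiches = msServe remaining sandwiches := by
  induction sandwiches generalizing remaining h with
  | nil => rfl
  | cons s rest ih =>
    have hcount := hinv s
    by_cases hmem : s ∈ remaining
    · have hpos : (0 : Int) < h.getD s 0 := by
        rw [hcount]; exact_mod_cast List.count_pos_iff.mpr hmem
      have hcontains : h.contains s = true := by
        rw [PySem.Dict.contains_eq_isSome_get?]
        cases hg : h.get? s with
        | none =>
          exfalso
          rw [PySem.Dict.getD_eq_get?_getD, hg] at hpos
          simp at hpos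
        | some v => rfl
      have hlen : (remaining.length : Int) - 1 = ((remaining.erase s).length : Int) := by
        rw [List.length_erase_of_mem hmem]
        have : 0 < remaining.length := List.length_pos_of_mem hmem
        omega
      have hinv' : ∀ x, (h.insert s (h.getD s 0 - 1)).getD x 0 = (remaining.erase s).count x := by
        intro x
        rw [PySem.Dict.getD_insert]
        by_cases hxs : x = s
        · subst hxs
          rw [if_pos rfl, hcount, List.count_erase_self]
          have : 0 < remaining.count x := List.count_pos_iff.mpr hmem
          omega
        · rw [if_neg hxs, hinv x, List.count_erase_of_ne hxs]
      simp only [pvServeA, msServe, hcontains, hpos, hmem, if_pos, decide_true,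
        Bool.true_and]
      rw [hlen]
      exact ih _ _ hinv'
    · have hzero : h.getD s 0 = 0 := by
        rw [hcount]
        simp [List.count_eq_zero_of_not_mem hmem]
      simp [pvServeA, msServe, hzero, hmem]

-- B's rotation loop equals msServe: invariant — the last rot elements of the deque
-- all differ from the current sandwich
theorem deqLoop_eq_ms (sw : List Int) : ∀ (k : Nat) (q : List Int) (rot : Nat),
    q.length - rot = k → rot ≤ q.length →
    (∀ s rest, sw = s :: rest → ∀ x ∈ q.drop (q.length - rot), x ≠ s) →
    pvDeqLoop q sw rot = msServe q sw := by
  induction sw with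
  | nil =>
    intro k q rot _ _ _
    cases q <;> simp [pvDeqLoop, msServe]
  | cons s rest ih =>
    intro k
    induction k with
    | zero =>
      intro q rot hk hle hcond
      have hrot : rot = q.length := by omega
      have hnm : s ∉ q := by
        intro hm
        exact hcond s rest rfl s (by simpa [hrot] using hm) rfl
      cases q with
      | nil => simp [pvDeqLoop, msServe]
      | cons a t =>
        simp only [pvDeqLoop, msServe]
        rw [if_neg (by omega), if_neg hnm]
    | succ k ihk =>
      intro q rot hk hle hcond
      cases q with
      | nil => simp at hk
      | cons a t =>
        simp only [List.length_cons] at hk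
        have hlt : rot < (a :: t).length := by simp; omega
        simp only [pvDeqLoop, if_pos hlt]
        by_cases has : a = s
        · subst has
          rw [ih (t.length) t 0 (by omega) (by omega)
              (by intro s' rest' h' x hx; simp at hx)]
          have : msServe (a :: t) (a :: rest) = msServe t rest := by
            simp [msServe, List.erase_cons_head]
          rw [if_pos rfl, this]
        · rw [if_neg has]
          have hlt' : rot < t.length + 1 := by simpa using hlt
          have hle' : rot + 1 ≤ (t ++ [a]).length := by
            simp only [List.length_append, List.length_cons, List.length_nil]; omega
          have hdropq : (a :: t).drop ((a :: t).length - rot) = t.drop (t.length - rot) := by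
            have h1 : (a :: t).length - rot = (t.length - rot) + 1 := by
              simp only [List.length_cons]; omega
            rw [h1]; simp
          have hcond' : ∀ s' rest', (s :: rest) = s' :: rest' →
              ∀ x ∈ (t ++ [a]).drop ((t ++ [a]).length - (rot + 1)), x ≠ s' := by
            intro s' rest' heq x hx
            injection heq with h1 h2
            subst h1
            have hlen' : (t ++ [a]).length - (rot + 1) = t.length - rot := by
              simp only [List.length_append, List.length_cons, List.length_nil]; omega
            rw [hlen'] at hx
            have hnt : t.length - rot ≤ t.length := by omega
            rw [List.drop_append_of_le_length hnt] at hx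
            rcases List.mem_append.mp hx with hx1 | hx2
            · exact hcond s rest rfl x (by rw [hdropq]; exact hx1)
            · simp at hx2; subst hx2; exact has
          rw [ihk (t ++ [a]) (rot + 1) (by
            simp only [List.length_append, List.length_cons, List.length_nil]
            omega) hle' hcond']
          exact msServe_perm _ _ _ (by simp)

-- ===== VERDICT (by name: the statement is the Claim_ definition above) =====
theorem numberOfStudents_spec : Claim_equal_numberOfStudents := by
  intro students sandwiches _
  unfold Spec_numberOfStudents numberOfStudents numberOfStudents_alt
  rw [serveA_eq_ms sandwiches students _ (fun x => by
    rw [getD_build, PySem.Dict.getD_empty]; omega)]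
  exact (deqLoop_eq_ms sandwiches (students.length) students 0 (by omega) (by omega)
    (by intro s rest _ x hx; simp at hx)).symm
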